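-- pv_equiv track=rewrite | github.com/BenCritt/profile_workspace_heroku | projects/robots_analyzer_utils.py | _find_matching_group
-- ===== SOURCE A (Python) =====
-- def _find_matching_group(groups, bot_name):
--     """
--     Find the most specific group matching *bot_name*.
--     Exact match takes priority over wildcard (*).
--     """
--     wildcard_group = None
--     for group in groups:
--         for ua in group["user_agents"]:
--             if ua == "*":
--                 wildcard_group = group
--             elif ua.lower() == bot_name.lower():
--                 return group
--     return wildcard_group
-- ===== SOURCE B (Python) =====
-- def _find_matching_group(groups, bot_name):
--     """Two-pass version: first scan for an exact (case-insensitive) name match,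
--     then, failing that, scan for the last group advertising the '*' wildcard."""
--     target = bot_name.lower()
--     for group in groups:
--         if any(ua != "*" and ua.lower() == target for ua in group["user_agents"]):
--             return group
--     fallback = None
--     for group in groups:
--         if "*" in group["user_agents"]:
--             fallback = group
--     return fallback
-- ===== Notes on version B (the rewrite author's own statement) =====
-- stated objective: simpler
-- what changed: Replaces A's single interleaved scan with a mutable wildcard accumulator by two separate passes: a first pass returning the first group with an exact case-insensitive match, and only if that fails a second pass keeping the last group containing '*'.
import Mathlib
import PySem

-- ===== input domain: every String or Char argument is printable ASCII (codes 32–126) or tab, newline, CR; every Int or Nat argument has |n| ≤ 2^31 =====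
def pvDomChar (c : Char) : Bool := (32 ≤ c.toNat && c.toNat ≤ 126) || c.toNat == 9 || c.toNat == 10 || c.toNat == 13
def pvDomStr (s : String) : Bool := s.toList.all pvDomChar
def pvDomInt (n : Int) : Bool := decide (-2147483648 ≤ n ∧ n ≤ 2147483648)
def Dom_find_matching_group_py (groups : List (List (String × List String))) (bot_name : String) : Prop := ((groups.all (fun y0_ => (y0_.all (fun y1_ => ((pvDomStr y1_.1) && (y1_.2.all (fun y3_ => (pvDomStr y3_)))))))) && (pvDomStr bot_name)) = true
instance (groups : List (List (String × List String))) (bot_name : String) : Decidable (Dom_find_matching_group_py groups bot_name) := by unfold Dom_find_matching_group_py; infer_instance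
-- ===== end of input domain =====

-- B replaces A's single interleaved scan (mutable wildcard accumulator) by two separate passes:
-- first pass returns the first exact case-insensitive match, second pass keeps the last '*' group.


-- ===== PORT A =====
-- group["user_agents"]: first-match lookup in the association list (exact when the key is
-- present, which Pre_ guarantees; on a missing key Python raises KeyError).
def pvUas (g : List (String × List String)) : List String :=
  match g.lookup "user_agents" with
  | some l => l
  | none => []

-- the inner 'for ua in group["user_agents"]' loop: .inr g = early 'return group',
-- .inl w = fall through with the (possibly updated) wildcard_group w
def pvInnerA (g : List (String × List String)) (bot_name : String) :
    List String → Option (List (String × List String)) →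
    Sum (Option (List (String × List String))) (List (String × List String))
  | [], w => .inl w
  | ua :: rest, w =>
    if ua = "*" then pvInnerA g bot_name rest (some g)
    else if PySem.Str.lower ua = PySem.Str.lower bot_name then .inr g
    else pvInnerA g bot_name rest w

-- the outer 'for group in groups' loop carrying wildcard_group
def pvLoopA (bot_name : String) :
    List (List (String × List String)) → Option (List (String × List String)) →
    Option (List (String × List String))
  | [], w => w
  | g :: rest, w =>
    match pvInnerA g bot_name (pvUas g) w with
    | .inl w' => pvLoopA bot_name rest w'
    | .inr r => some r

def find_matching_group_py (groups : List (List (String × List String))) (bot_name : String) : Option (List (String × List String)) :=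
  pvLoopA bot_name groups none

-- ===== PORT B =====
def find_matching_group_py_alt (groups : List (List (String × List String))) (bot_name : String) : Option (List (String × List String)) :=
  let target := PySem.Str.lower bot_name
  match groups.find? (fun g => (pvUas g).any (fun ua => decide (ua ≠ "*") && (PySem.Str.lower ua == target))) with
  | some g => some g
  | none => groups.foldl (fun acc g => if (pvUas g).contains "*" then some g else acc) none

-- ===== PRECONDITION & SPEC =====
-- Exactly the inputs on which Python A returns (no KeyError): every group carries the
-- "user_agents" key, or an exact (case-insensitive, non-'*') match for bot_name occurs in
-- some group before the first keyless one, so the function returns before reaching it.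
def Pre_find_matching_group_py (groups : List (List (String × List String))) (bot_name : String) : Prop :=
  (groups.all (fun g => (g.lookup "user_agents").isSome)
    || (groups.takeWhile (fun g => (g.lookup "user_agents").isSome)).any
        (fun g => ((g.lookup "user_agents").getD []).any
          (fun ua => decide (ua ≠ "*") && (PySem.Str.lower ua == PySem.Str.lower bot_name)))) = true
instance (groups : List (List (String × List String))) (bot_name : String) : Decidable (Pre_find_matching_group_py groups bot_name) := by unfold Pre_find_matching_group_py; infer_instance

def pvWitness_find_matching_group_py : (List (List (String × List String))) × String :=
  ([[("user_agents", ["Googlebot", "*"])]], "googlebot")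

def Spec_find_matching_group_py (groups : List (List (String × List String))) (bot_name : String) (out : Option (List (String × List String))) : Prop := out = find_matching_group_py_alt groups bot_name
instance (groups : List (List (String × List String))) (bot_name : String) (out : Option (List (String × List String))) : Decidable (Spec_find_matching_group_py groups bot_name out) := by unfold Spec_find_matching_group_py; infer_instance

-- ===== CLAIM (what is proved, stated in full; the proofs are below) =====
def Claim_equal_find_matching_group_py : Prop := ∀ (groups : List (List (String × List String))) (bot_name : String), Dom_find_matching_group_py groups bot_name → Pre_find_matching_group_py groups bot_name → Spec_find_matching_group_py groups bot_name (find_matching_group_py groups bot_name)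

-- ===== LEMMAS AND PROOFS =====

-- the inner loop either returns the group (some exact non-'*' match) or yields the
-- wildcard accumulator, updated to g exactly when '*' occurs among the uas
theorem pvInnerA_spec (g : List (String × List String)) (bot_name : String) :
    ∀ (uas : List String) (w : Option (List (String × List String))),
      pvInnerA g bot_name uas w =
        if uas.any (fun ua => decide (ua ≠ "*") && (PySem.Str.lower ua == PySem.Str.lower bot_name)) then
          .inr g
        else
          .inl (if uas.contains "*" then some g else w) := by
  intro uas
  induction uas with
  | nil => intro w; simp [pvInnerA]
  | cons ua rest ih =>
    intro w
    by_cases hstar : ua = "*"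
    · subst hstar
      simp [pvInnerA, ih]
    · by_cases hm : PySem.Str.lower ua = PySem.Str.lower bot_name
      · simp [pvInnerA, hstar, hm]
      · simp [pvInnerA, hstar, hm, ih, Ne.symm hstar]

-- the outer loop with accumulator w equals: first exact-match group if any, else the
-- wildcard fold starting from w
theorem pvLoopA_spec (bot_name : String) :
    ∀ (groups : List (List (String × List String))) (w : Option (List (String × List String))),
      pvLoopA bot_name groups w =
        match groups.find? (fun g => (pvUas g).any (fun ua => decide (ua ≠ "*") && (PySem.Str.lower ua == PySem.Str.lower bot_name))) with
        | some g => some g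
        | none => groups.foldl (fun acc g => if (pvUas g).contains "*" then some g else acc) w := by
  intro groups
  induction groups with
  | nil => intro w; simp [pvLoopA]
  | cons g rest ih =>
    intro w
    cases hp : (pvUas g).any (fun ua => decide (ua ≠ "*") && (PySem.Str.lower ua == PySem.Str.lower bot_name)) with
    | true => simp_all [pvLoopA, pvInnerA_spec]
    | false =>
      simp_all [pvLoopA, pvInnerA_spec]
      rw [if_neg (by rintro ⟨x, hx, h1, h2⟩; exact hp x hx h1 h2)]

-- ===== VERDICT (by name: the statement is the Claim_ definition above) =====
theorem find_matching_group_py_spec : Claim_equal_find_matching_group_py := by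
  intro groups bot_name _ _
  unfold Spec_find_matching_group_py find_matching_group_py find_matching_group_py_alt
  simpa using pvLoopA_spec bot_name groups none
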